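-- pv_equiv track=rewrite | github.com/NathanWBright/CS101L | Assignment_10/SourceCode/Lab 10 - NB.py | remove_short_words
-- ===== SOURCE A (Python) =====
-- def remove_short_words(text):
-- # Gets rid of punctuation, capitalization, and elements that may mess with our data, and removes any word that is less than 4 characters long.
--     valid_words = []
--     text = text.replace('.','')
--     text = text.replace(',','')
--     text = text.replace('!','')
--     text = text.replace('?','')
--     text = text.lower()
--     text = text.split()
--     for word in text:
--         if len(word) > 3:
--             valid_words.append(word)
--     return valid_words
-- ===== SOURCE B (Python) =====
-- def remove_short_words(text):
--     # Single character-level state machine: one pass over the text, skipping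
--     # punctuation, lowercasing kept characters, cutting tokens at whitespace
--     # and keeping a token only if more than 3 characters were collected.
--     valid_words = []
--     cur = []
--     for ch in text:
--         if ch in '.,!?':
--             continue
--         if ch.isspace():
--             if len(cur) > 3:
--                 valid_words.append(''.join(cur))
--             cur = []
--         else:
--             cur.append(ch.lower())
--     if len(cur) > 3:
--         valid_words.append(''.join(cur))
--     return valid_words
-- ===== Notes on version B (the rewrite author's own statement) =====
-- stated objective: alternative
-- what changed: A makes five whole-string passes (four replaces, lower) plus split and a filter loop; B is a single character-level state machine that in one pass skips punctuation, lowercases each kept character, builds the current token in a buffer and emits it at whitespace/end only if longer than 3 characters.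
import Mathlib
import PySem

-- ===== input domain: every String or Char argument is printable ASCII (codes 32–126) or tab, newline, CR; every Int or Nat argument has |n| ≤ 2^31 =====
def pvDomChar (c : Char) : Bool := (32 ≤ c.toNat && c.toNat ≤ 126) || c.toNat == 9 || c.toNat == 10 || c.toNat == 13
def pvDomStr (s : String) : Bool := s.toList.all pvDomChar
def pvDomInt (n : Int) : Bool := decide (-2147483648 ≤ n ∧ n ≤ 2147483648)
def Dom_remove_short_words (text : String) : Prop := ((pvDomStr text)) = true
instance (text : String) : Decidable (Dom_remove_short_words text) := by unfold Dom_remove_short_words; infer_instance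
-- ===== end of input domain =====

-- B replaces A's staged whole-string passes (four replaces, lower, split, filter loop)
-- by a single character-level state machine; objective: alternative, same exact value.

-- ===== PORT A =====
def remove_short_words (text : String) : List String :=
  let text1 := PySem.Str.replace text "." ""
  let text2 := PySem.Str.replace text1 "," ""
  let text3 := PySem.Str.replace text2 "!" ""
  let text4 := PySem.Str.replace text3 "?" ""
  let text5 := PySem.Str.lower text4
  let words := PySem.Str.split₀ text5
  words.foldl (fun valid_words word =>
    if 3 < PySem.Str.len word then valid_words ++ [word] else valid_words) []

-- ===== PORT B =====
-- one step of the state machine: state = (emitted words, current token buffer)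
def rswStep (s : List String × List Char) (ch : Char) : List String × List Char :=
  if ch == '.' || ch == ',' || ch == '!' || ch == '?' then s
  else if PySem.Chars.isspace ch then
    (if 3 < s.2.length then s.1 ++ [String.ofList s.2] else s.1, [])
  else (s.1, s.2 ++ [PySem.Chars.lowerChar ch])

def remove_short_words_alt (text : String) : List String :=
  let r := text.toList.foldl rswStep ([], [])
  if 3 < r.2.length then r.1 ++ [String.ofList r.2] else r.1

-- ===== PRECONDITION & SPEC =====
def Spec_remove_short_words (text : String) (out : List String) : Prop := out = remove_short_words_alt text
instance (text : String) (out : List String) : Decidable (Spec_remove_short_words text out) := by unfold Spec_remove_short_words; infer_instance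

-- ===== CLAIM =====
def Claim_equal_remove_short_words : Prop := ∀ (text : String), Dom_remove_short_words text → Spec_remove_short_words text (remove_short_words text)

-- ===== LEMMAS AND PROOFS =====

-- the characters A's replaces keep
def rswKeep (c : Char) : Bool := !(c == '.' || c == ',' || c == '!' || c == '?')

-- single-character replace-by-empty is a filter
theorem go_repl (p : Char) (s : List Char) : ∀ (fuel : Nat) (acc : List Char),
    s.length ≤ fuel →
    PySem.Chars.replace.go [p] [] fuel s acc = acc.reverse ++ s.filter (fun c => !(c == p)) := by
  induction s with
  | nil => intro fuel acc _; cases fuel <;> simp [PySem.Chars.replace.go]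
  | cons c t ih =>
    intro fuel acc h
    match fuel with
    | fuel + 1 =>
      by_cases hc : c = p
      · subst hc
        simp only [PySem.Chars.replace.go, List.isPrefixOf]
        rw [if_pos (by simp), show List.drop [c].length (c :: t) = t from rfl,
            show ([] : List Char).reverse ++ acc = acc from rfl,
            ih fuel acc (by simpa using h)]
        simp
      · simp only [PySem.Chars.replace.go]
        rw [if_neg (by simp [List.isPrefixOf, Ne.symm hc])]
        rw [ih fuel (c :: acc) (by simpa using h)]
        simp [hc]

theorem repl_single (p : Char) (s : List Char) :
    PySem.Chars.replace s [p] [] = s.filter (fun c => !(c == p)) := by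
  simp [PySem.Chars.replace, go_repl p s s.length [] le_rfl]

-- the four chained replaces of A are one filter by rswKeep
theorem four_repl (l : List Char) :
    PySem.Chars.replace (PySem.Chars.replace (PySem.Chars.replace (PySem.Chars.replace
      l ['.'] []) [','] []) ['!'] []) ['?'] [] = l.filter rswKeep := by
  simp only [repl_single, List.filter_filter]
  apply List.filter_congr
  intro c _
  unfold rswKeep
  cases h1 : c == '.' <;> cases h2 : c == ',' <;> cases h3 : c == '!' <;> cases h4 : c == '?' <;> rfl

-- split₀.go's accumulator is a prefix of the result
theorem go_acc (s : List Char) : ∀ (cur : List Char) (acc : List (List Char)),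
    PySem.Chars.split₀.go s cur acc = acc.reverse ++ PySem.Chars.split₀.go s cur [] := by
  induction s with
  | nil => intro cur acc; by_cases hc : cur.isEmpty <;> simp [PySem.Chars.split₀.go, hc]
  | cons c t ih =>
    intro cur acc
    simp only [PySem.Chars.split₀.go]
    by_cases hs : PySem.Chars.isspace c
    · rw [if_pos hs, if_pos hs]
      by_cases hc : cur.isEmpty
      · rw [if_pos hc, if_pos hc, ih [] acc]
      · rw [if_neg hc, if_neg hc, ih [] (cur.reverse :: acc), ih [] [cur.reverse]]
        simp
    · simp only [hs]
      rw [ih (c :: cur) acc]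
      simp

-- lowerChar moves uppercase letters to lowercase letters; it never creates or destroys whitespace
theorem isspace_lowerChar (c : Char) :
    PySem.Chars.isspace (PySem.Chars.lowerChar c) = PySem.Chars.isspace c := by
  unfold PySem.Chars.lowerChar
  by_cases hu : PySem.Chars.isupper c
  · rw [if_pos hu]
    unfold PySem.Chars.isupper at hu
    simp only [Bool.and_eq_true, decide_eq_true_eq] at hu
    have h1 : 65 ≤ c.toNat := Fin.mk_le_mk.mp hu.1
    have h2 : c.toNat ≤ 90 := Fin.mk_le_mk.mp hu.2
    have hlt : c.toNat + 32 < 55296 := by omega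
    have h3 : (Char.ofNat (c.toNat + 32)).toNat = c.toNat + 32 := by
      unfold Char.ofNat
      rw [dif_pos (Or.inl hlt)]
      exact Char.toNat_ofNatAux (Or.inl hlt)
    unfold PySem.Chars.isspace
    rw [Bool.eq_iff_iff]
    simp only [h3, Bool.or_eq_true, Bool.and_eq_true, decide_eq_true_eq]
    omega
  · rw [if_neg hu]

-- the scan's punctuation test is the complement of rswKeep
theorem rswPunct_eq (c : Char) :
    (c == '.' || c == ',' || c == '!' || c == '?') = !rswKeep c := by
  unfold rswKeep; rw [Bool.not_not]

-- finishing the scan: flush the remaining buffer if it is a long token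
def rswFinish (r : List String × List Char) : List String :=
  if 3 < r.2.length then r.1 ++ [String.ofList r.2] else r.1

-- the state machine computes: tokens of split₀ on the lowered, punctuation-filtered
-- remainder, appended behind the already-emitted words, keeping only long tokens
theorem scan_eq (l : List Char) : ∀ (acc : List String) (cur : List Char),
    rswFinish (l.foldl rswStep (acc, cur))
      = acc ++ List.map String.ofList
          ((PySem.Chars.split₀.go (List.map PySem.Chars.lowerChar (List.filter rswKeep l))
              cur.reverse []).filter (fun w => decide (3 < w.length))) := by
  induction l with
  | nil =>
    intro acc cur
    by_cases hc : cur = []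
    · subst hc; simp [rswFinish, PySem.Chars.split₀.go]
    · have hgo : PySem.Chars.split₀.go [] cur.reverse [] = [cur] := by
        simp [PySem.Chars.split₀.go, List.isEmpty_iff, hc]
      rw [List.foldl_nil]
      simp only [List.filter_nil, List.map_nil]
      rw [hgo]
      by_cases hl : 3 < cur.length
      · simp [rswFinish, hl]
      · simp [rswFinish, hl]
  | cons c t ih =>
    intro acc cur
    by_cases hk : rswKeep c
    · rw [List.filter_cons_of_pos hk, List.map_cons]
      by_cases hs : PySem.Chars.isspace c
      · have hs' : PySem.Chars.isspace (PySem.Chars.lowerChar c) = true := by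
          rw [isspace_lowerChar]; exact hs
        have hstep : rswStep (acc, cur) c
            = (if 3 < cur.length then acc ++ [String.ofList cur] else acc, []) := by
          simp [rswStep, rswPunct_eq, hk, hs]
        rw [List.foldl_cons, hstep]
        by_cases hc : cur = []
        · have hgo : PySem.Chars.split₀.go
              (PySem.Chars.lowerChar c :: List.map PySem.Chars.lowerChar (List.filter rswKeep t))
              cur.reverse []
              = PySem.Chars.split₀.go (List.map PySem.Chars.lowerChar (List.filter rswKeep t)) [] [] := by
            subst hc; simp [PySem.Chars.split₀.go, hs']
          rw [hgo]
          subst hc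
          rw [if_neg (by simp)]
          simpa using ih acc []
        · have hgo : PySem.Chars.split₀.go
              (PySem.Chars.lowerChar c :: List.map PySem.Chars.lowerChar (List.filter rswKeep t))
              cur.reverse []
              = [cur] ++ PySem.Chars.split₀.go (List.map PySem.Chars.lowerChar (List.filter rswKeep t)) [] [] := by
            rw [show PySem.Chars.split₀.go
                  (PySem.Chars.lowerChar c :: List.map PySem.Chars.lowerChar (List.filter rswKeep t))
                  cur.reverse []
                = PySem.Chars.split₀.go (List.map PySem.Chars.lowerChar (List.filter rswKeep t)) []
                    [cur.reverse.reverse] from by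
              simp [PySem.Chars.split₀.go, hs', List.isEmpty_iff, hc]]
            rw [go_acc _ [] [cur.reverse.reverse], List.reverse_reverse]
            simp
          rw [hgo, List.filter_append, List.map_append,
              ih (if 3 < cur.length then acc ++ [String.ofList cur] else acc) []]
          by_cases hl : 3 < cur.length
          · simp [hl]
          · simp [hl]
      · have hs' : PySem.Chars.isspace (PySem.Chars.lowerChar c) = false := by
          rw [isspace_lowerChar]; simpa using hs
        have hstep : rswStep (acc, cur) c = (acc, cur ++ [PySem.Chars.lowerChar c]) := by
          simp [rswStep, rswPunct_eq, hk, hs]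
        have hgo : PySem.Chars.split₀.go
            (PySem.Chars.lowerChar c :: List.map PySem.Chars.lowerChar (List.filter rswKeep t))
            cur.reverse []
            = PySem.Chars.split₀.go (List.map PySem.Chars.lowerChar (List.filter rswKeep t))
                (cur ++ [PySem.Chars.lowerChar c]).reverse [] := by
          simp [PySem.Chars.split₀.go, hs']
        rw [List.foldl_cons, hstep, hgo]
        exact ih acc (cur ++ [PySem.Chars.lowerChar c])
    · rw [List.filter_cons_of_neg (by simpa using hk)]
      have hstep : rswStep (acc, cur) c = (acc, cur) := by
        simp [rswStep, rswPunct_eq, hk]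
      rw [List.foldl_cons, hstep]
      exact ih acc cur

-- B's definition, seen through rswFinish
theorem alt_eq (text : String) :
    remove_short_words_alt text = rswFinish (text.toList.foldl rswStep ([], [])) := rfl

-- ===== VERDICT (by name: the statement is the Claim_ definition above) =====
theorem remove_short_words_spec : Claim_equal_remove_short_words := by
  intro text _
  unfold Spec_remove_short_words remove_short_words
  rw [show (fun (valid_words : List String) word => if 3 < PySem.Str.len word then valid_words ++ [word] else valid_words)
      = (fun acc w => if (decide (3 < PySem.Str.len w)) = true then acc ++ [id w] else acc) from by
    funext acc w; simp]
  rw [PySem.List.foldl_append_if (fun w => decide (3 < PySem.Str.len w)) id, List.nil_append, List.map_id]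
  rw [alt_eq, scan_eq text.toList [] [], List.nil_append]
  show List.filter _ (PySem.Str.split₀ _) = _
  unfold PySem.Str.split₀ PySem.Chars.split₀
  rw [List.filter_map]
  simp only [PySem.Str.toList_lower, PySem.Str.toList_replace]
  rw [show ("." : String).toList = ['.'] from rfl, show ("," : String).toList = [','] from rfl,
      show ("!" : String).toList = ['!'] from rfl, show ("?" : String).toList = ['?'] from rfl,
      show ("" : String).toList = [] from rfl]
  rw [four_repl]
  show _ = List.map String.ofList (List.filter _ (PySem.Chars.split₀.go (PySem.Chars.lower _) _ _))
  unfold PySem.Chars.lower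
  congr 1
  apply List.filter_congr
  intro w _
  simp [PySem.Str.len_eq]
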